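-- pv_equiv track=rewrite | github.com/jh5117-debug/world_model_phys | scripts/prepprocess_data.py | aggregate_events_to_video_frames
-- ===== SOURCE A (Python) =====
-- def aggregate_events_to_video_frames(video_frame_indices, world_events, total_source_frames):
--     """
--     Aggregate raw world events into the kept video-frame bins after FPS downsampling.
--
--     If source FPS is 32 and target FPS is 16, each kept frame owns the source-frame
--     interval [current_kept_idx, next_kept_idx).
--     """
--     if not world_events:
--         return [[] for _ in video_frame_indices]
--
--     events_by_frame = {}
--     for event in world_events:
--         frame_count = event.get("frame_count")
--         if frame_count is None:
--             continue
--         events_by_frame.setdefault(frame_count, []).append(event)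
--
--     aligned_events = []
--     for idx, start_fc in enumerate(video_frame_indices):
--         if idx + 1 < len(video_frame_indices):
--             end_fc = video_frame_indices[idx + 1]
--         else:
--             end_fc = total_source_frames
--
--         bucket = []
--         for frame_count in range(start_fc, end_fc):
--             bucket.extend(events_by_frame.get(frame_count, []))
--         aligned_events.append(bucket)
--
--     return aligned_events
-- ===== SOURCE B (Python) =====
-- def aggregate_events_to_video_frames(video_frame_indices, world_events, total_source_frames):
--     # One stable sort of the events by frame_count, then one interval filter per
--     # bin -- no dict grouping and no scan over every source frame of the interval.
--     tagged = sorted(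
--         (e for e in world_events if e.get("frame_count") is not None),
--         key=lambda e: e["frame_count"],
--     )
--     n = len(video_frame_indices)
--     out = []
--     for i in range(n):
--         start = video_frame_indices[i]
--         end = video_frame_indices[i + 1] if i + 1 < n else total_source_frames
--         out.append([e for e in tagged if start <= e["frame_count"] < end])
--     return out
-- ===== Notes on version B (the rewrite author's own statement) =====
-- stated objective: faster
-- what changed: Replaces A's dict-grouping plus a per-bin scan over every source frame in range(start,end) with one stable sort of the events by frame_count followed by a per-bin interval filter, so no iteration over individual source-frame numbers happens at all.
import Mathlib
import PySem

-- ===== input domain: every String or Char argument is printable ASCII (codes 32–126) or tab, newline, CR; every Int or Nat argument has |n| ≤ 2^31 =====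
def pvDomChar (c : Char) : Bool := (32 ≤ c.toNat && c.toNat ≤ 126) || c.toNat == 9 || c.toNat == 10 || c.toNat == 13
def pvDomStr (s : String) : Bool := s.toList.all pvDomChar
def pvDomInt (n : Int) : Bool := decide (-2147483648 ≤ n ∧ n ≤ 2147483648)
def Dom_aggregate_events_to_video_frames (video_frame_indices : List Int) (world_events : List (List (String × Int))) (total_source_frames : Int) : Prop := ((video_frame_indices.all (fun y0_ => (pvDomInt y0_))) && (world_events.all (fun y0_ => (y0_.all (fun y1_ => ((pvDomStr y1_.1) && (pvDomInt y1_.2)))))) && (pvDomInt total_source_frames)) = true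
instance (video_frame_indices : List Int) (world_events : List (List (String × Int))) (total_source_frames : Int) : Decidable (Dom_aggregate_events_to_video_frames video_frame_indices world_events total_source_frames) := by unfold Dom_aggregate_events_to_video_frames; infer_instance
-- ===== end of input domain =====

-- B replaces A's dict grouping + per-bin scan over every source frame of the interval by one
-- stable sort of the events by frame_count and a per-bin interval filter (faster: no per-frame scan).

-- ===== PORT A =====
-- events_by_frame.setdefault(fc, []).append(event)  ≡  d[fc] = d.get(fc, []) + [event]  (Dict.modify)
def pvAStep (d : PySem.Dict Int (List (List (String × Int)))) (event : List (String × Int)) : PySem.Dict Int (List (List (String × Int))) :=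
  match (PySem.Dict.mk event).get? "frame_count" with
  | none => d            -- frame_count is None / missing: continue
  | some fc => d.modify fc [] (fun b => b ++ [event])

def aggregate_events_to_video_frames (video_frame_indices : List Int) (world_events : List (List (String × Int))) (total_source_frames : Int) : List (List (List (String × Int))) :=
  if world_events = [] then video_frame_indices.map (fun _ => []) else
  let events_by_frame := world_events.foldl pvAStep PySem.Dict.empty
  (PySem.List.enumerate video_frame_indices).foldl (fun aligned_events p =>
    -- video_frame_indices[idx+1] is only read when idx+1 < len, so pyGetD with default 0 is exact
    let end_fc := if p.1 + 1 < PySem.List.len video_frame_indices then PySem.List.pyGetD video_frame_indices (p.1 + 1) 0 else total_source_frames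
    let bucket := (PySem.List.pyRange p.2 end_fc).foldl (fun b fc => b ++ events_by_frame.getD fc []) []
    aligned_events ++ [bucket]) []

-- ===== PORT B =====
-- e["frame_count"]: every element of `tagged` passed the presence filter, so getD with default 0 is exact
def pvKey (e : List (String × Int)) : Int := (PySem.Dict.mk e).getD "frame_count" 0

def aggregate_events_to_video_frames_alt (video_frame_indices : List Int) (world_events : List (List (String × Int))) (total_source_frames : Int) : List (List (List (String × Int))) :=
  let tagged := PySem.List.sorted (world_events.filter (fun e => ((PySem.Dict.mk e).get? "frame_count").isSome)) pvKey
  let n := PySem.List.len video_frame_indices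
  (PySem.List.pyRange 0 n).foldl (fun out i =>
    let start := PySem.List.pyGetD video_frame_indices i 0
    let stop := if i + 1 < n then PySem.List.pyGetD video_frame_indices (i + 1) 0 else total_source_frames
    out ++ [tagged.filter (fun e => decide (start ≤ pvKey e) && decide (pvKey e < stop))]) []

-- ===== PRECONDITION & SPEC =====
def Spec_aggregate_events_to_video_frames (video_frame_indices : List Int) (world_events : List (List (String × Int))) (total_source_frames : Int) (out : List (List (List (String × Int)))) : Prop := out = aggregate_events_to_video_frames_alt video_frame_indices world_events total_source_frames
instance (video_frame_indices : List Int) (world_events : List (List (String × Int))) (total_source_frames : Int) (out : List (List (List (String × Int)))) : Decidable (Spec_aggregate_events_to_video_frames video_frame_indices world_events total_source_frames out) := by unfold Spec_aggregate_events_to_video_frames; infer_instance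

-- ===== CLAIM (what is proved, stated in full; the proofs are below) =====
def Claim_equal_aggregate_events_to_video_frames : Prop := ∀ (video_frame_indices : List Int) (world_events : List (List (String × Int))) (total_source_frames : Int), Dom_aggregate_events_to_video_frames video_frame_indices world_events total_source_frames → Spec_aggregate_events_to_video_frames video_frame_indices world_events total_source_frames (aggregate_events_to_video_frames video_frame_indices world_events total_source_frames)

-- ===== LEMMAS AND PROOFS =====

-- A's grouping dict looks up to exactly the events carrying that frame_count, in input order.
lemma pv_dict_getD (we : List (List (String × Int))) :
    ∀ (d : PySem.Dict Int (List (List (String × Int)))) (fc : Int),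
      (we.foldl pvAStep d).getD fc [] =
        d.getD fc [] ++ we.filter (fun e => decide ((PySem.Dict.mk e).get? "frame_count" = some fc)) := by
  induction we with
  | nil => simp
  | cons e t ih =>
    intro d fc
    simp only [List.foldl_cons]
    rcases h : (PySem.Dict.mk e).get? "frame_count" with _ | k
    · simp [pvAStep, h, ih]
    · simp only [pvAStep, h, ih]
      by_cases hk : fc = k
      · subst hk
        simp [h]
      · simp [PySem.Dict.getD_modify, hk, h, Ne.symm hk]

-- selecting by get? = some fc is selecting by pvKey among key-carrying events
lemma pv_filter_key (we : List (List (String × Int))) (fc : Int) :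
    we.filter (fun e => decide ((PySem.Dict.mk e).get? "frame_count" = some fc)) =
      (we.filter (fun e => ((PySem.Dict.mk e).get? "frame_count").isSome)).filter
        (fun e => decide (pvKey e = fc)) := by
  rw [List.filter_filter]
  apply List.filter_congr
  intro e _
  rcases h : (PySem.Dict.mk e).get? "frame_count" with _ | v
  · simp
  · have : pvKey e = v := by simp [pvKey, PySem.Dict.getD_eq_get?_getD, h]
    simp [this]

-- inserting x into a key-sorted list puts x after every element with the same key
lemma pv_filter_insertBy {α : Type} (key : α → Int) (x : α) (c : Int) :
    ∀ (ys : List α), ys.Pairwise (fun a b => key a ≤ key b) →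
      (PySem.List.insertBy (fun a b => decide (key a < key b)) x ys).filter (fun z => decide (key z = c)) =
        ys.filter (fun z => decide (key z = c)) ++ (if key x = c then [x] else []) := by
  intro ys
  induction ys with
  | nil =>
    intro _
    by_cases hc : key x = c <;> simp [PySem.List.insertBy, List.filter, hc]
  | cons y t ih =>
    intro hp
    rw [List.pairwise_cons] at hp
    simp only [PySem.List.insertBy]
    by_cases hlt : key x < key y
    · simp only [hlt, decide_true, if_true]
      by_cases hc : key x = c
      · have hnil : (y :: t).filter (fun z => decide (key z = c)) = [] := by
          rw [List.filter_eq_nil_iff]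
          intro a ha
          have hya : key y ≤ key a := by
            rcases List.mem_cons.mp ha with rfl | ha
            · exact le_refl _
            · exact hp.1 a ha
          simp only [decide_eq_true_eq]
          omega
        rw [List.filter_cons_of_pos (by simp [hc]), hnil]
        simp [hc]
      · rw [List.filter_cons_of_neg (by simp [hc])]
        simp [hc]
    · simp only [hlt, decide_false, Bool.false_eq_true, if_false]
      by_cases hyc : key y = c
      · rw [List.filter_cons_of_pos (by simp [hyc]), List.filter_cons_of_pos (by simp [hyc]),
            ih hp.2, List.cons_append]
      · rw [List.filter_cons_of_neg (by simp [hyc]), List.filter_cons_of_neg (by simp [hyc]),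
            ih hp.2]

-- STABILITY: sorting by key does not reorder the events of any single frame_count
lemma pv_filter_sorted {α : Type} (key : α → Int) (c : Int) (L : List α) :
    (PySem.List.sorted L key).filter (fun z => decide (key z = c)) =
      L.filter (fun z => decide (key z = c)) := by
  induction L using List.reverseRecOn with
  | nil => rfl
  | append_singleton L x ih =>
    rw [PySem.List.sorted_eq_foldl_insertBy, List.foldl_append, List.foldl_cons, List.foldl_nil,
        ← PySem.List.sorted_eq_foldl_insertBy]
    rw [pv_filter_insertBy key x c _ (PySem.List.sorted_pairwise L key), ih, List.filter_append]
    congr 1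
    by_cases hc : key x = c <;> simp [List.filter, hc]

-- on a key-sorted list, an interval filter splits off its smallest key
lemma pv_filter_split {α : Type} (key : α → Int) (s e : Int) (hse : s < e) :
    ∀ (ys : List α), ys.Pairwise (fun a b => key a ≤ key b) →
      ys.filter (fun z => decide (s ≤ key z) && decide (key z < e)) =
        ys.filter (fun z => decide (key z = s)) ++
          ys.filter (fun z => decide (s + 1 ≤ key z) && decide (key z < e)) := by
  intro ys
  induction ys with
  | nil => simp
  | cons h t ih =>
    intro hp
    rw [List.pairwise_cons] at hp
    rcases lt_trichotomy (key h) s with hc | hc | hc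
    · have e1 : (decide (s ≤ key h) && decide (key h < e)) = false := by
        simp only [Bool.and_eq_false_iff, decide_eq_false_iff_not]; omega
      have e2 : (decide (key h = s)) = false := by
        simp only [decide_eq_false_iff_not]; omega
      have e3 : (decide (s + 1 ≤ key h) && decide (key h < e)) = false := by
        simp only [Bool.and_eq_false_iff, decide_eq_false_iff_not]; omega
      simp only [List.filter_cons, e1, e2, e3, Bool.false_eq_true, if_false]
      exact ih hp.2
    · have e1 : (decide (s ≤ key h) && decide (key h < e)) = true := by
        simp only [Bool.and_eq_true, decide_eq_true_eq]; omega
      have e2 : (decide (key h = s)) = true := by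
        simp only [decide_eq_true_eq]; omega
      have e3 : (decide (s + 1 ≤ key h) && decide (key h < e)) = false := by
        simp only [Bool.and_eq_false_iff, decide_eq_false_iff_not]; omega
      simp only [List.filter_cons, e1, e2, e3, Bool.false_eq_true, if_true, if_false]
      rw [ih hp.2, List.cons_append]
    · -- every key in h :: t exceeds s: the "= s" filter is empty and the two interval filters agree
      have hall : ∀ a ∈ h :: t, s < key a := by
        intro a ha
        rcases List.mem_cons.mp ha with rfl | ha
        · exact hc
        · exact lt_of_lt_of_le hc (hp.1 a ha)
      have hnil : (h :: t).filter (fun z => decide (key z = s)) = [] := by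
        rw [List.filter_eq_nil_iff]
        intro a ha
        have := hall a ha
        simp only [decide_eq_true_eq]
        omega
      rw [hnil, List.nil_append]
      apply List.filter_congr
      intro a ha
      have := hall a ha
      congr 1
      simp only [decide_eq_decide]
      omega

-- on a key-sorted list, the interval filter is the concatenation of the per-key filters
lemma pv_filter_group {α : Type} (key : α → Int) :
    ∀ (n : Nat) (s e : Int), (e - s).toNat = n →
      ∀ (ys : List α), ys.Pairwise (fun a b => key a ≤ key b) →
        ys.filter (fun z => decide (s ≤ key z) && decide (key z < e)) =
          (PySem.List.pyRange s e).flatMap (fun c => ys.filter (fun z => decide (key z = c))) := by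
  intro n
  induction n with
  | zero =>
    intro s e hn ys _
    have hse : e ≤ s := by omega
    rw [PySem.List.pyRange_one_eq_nil hse, List.flatMap_nil, List.filter_eq_nil_iff]
    intro a _
    simp only [Bool.and_eq_true, decide_eq_true_eq, not_and]
    omega
  | succ m ih =>
    intro s e hn ys hp
    have hse : s < e := by omega
    rw [PySem.List.pyRange_one_cons hse, List.flatMap_cons,
        ← ih (s + 1) e (by omega) ys hp]
    exact pv_filter_split key s e hse ys hp

-- one bin of A equals one bin of B
lemma pv_bucket (we : List (List (String × Int))) (s e : Int) :
    (PySem.List.pyRange s e).foldl (fun b fc => b ++ (we.foldl pvAStep PySem.Dict.empty).getD fc []) [] =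
      (PySem.List.sorted (we.filter (fun e => ((PySem.Dict.mk e).get? "frame_count").isSome)) pvKey).filter
        (fun z => decide (s ≤ pvKey z) && decide (pvKey z < e)) := by
  rw [PySem.List.foldl_append_eq_flatMap, List.nil_append]
  have hf : (fun fc => (we.foldl pvAStep PySem.Dict.empty).getD fc []) =
      (fun c => (PySem.List.sorted
          (we.filter (fun e => ((PySem.Dict.mk e).get? "frame_count").isSome)) pvKey).filter
        (fun z => decide (pvKey z = c))) := by
    funext c
    rw [pv_dict_getD we PySem.Dict.empty c, PySem.Dict.getD_empty, List.nil_append,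
        pv_filter_key, pv_filter_sorted]
  rw [hf]
  exact (pv_filter_group pvKey (e - s).toNat s e rfl _
    (PySem.List.sorted_pairwise _ pvKey)).symm

-- ===== VERDICT (by name: the statement is the Claim_ definition above) =====
theorem aggregate_events_to_video_frames_spec : Claim_equal_aggregate_events_to_video_frames := by
  intro vfi we tsf _
  unfold Spec_aggregate_events_to_video_frames
  unfold aggregate_events_to_video_frames aggregate_events_to_video_frames_alt
  by_cases hwe : we = []
  · subst hwe
    simp only [if_true, List.filter_nil]
    have hs : PySem.List.sorted ([] : List (List (String × Int))) pvKey = [] := rfl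
    rw [hs]
    simp only [List.filter_nil]
    rw [PySem.List.foldl_append_singleton_eq_map (f := fun _ : Int => ([] : List (List (String × Int))))]
    rw [List.nil_append, List.map_const', List.map_const', PySem.List.length_pyRange_one]
    simp [PySem.List.len]
  · simp only [hwe, if_false]
    rw [PySem.List.enumerate_eq_map_pyRange vfi 0, List.foldl_map]
    rw [PySem.List.foldl_append_singleton_eq_map, PySem.List.foldl_append_singleton_eq_map,
        List.nil_append, List.nil_append]
    apply List.map_congr_left
    intro j _
    exact pv_bucket we (PySem.List.pyGetD vfi j 0) _
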